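-- pv_equiv track=rewrite | github.com/warrenli0/prompt-ordering-research | main.py | generate_swap_orderings
-- ===== SOURCE A (Python) =====
-- def generate_swap_orderings(data):
--     orderings = []
--     n = len(data)
--     for i in range(n):
--         if i == 0:
--             orderings.append((list(range(n)), list(range(n))))
--         else:
--             new_order = list(range(n))
--             new_order[0], new_order[i] = new_order[i], new_order[0]
--             shuffled_order = [new_order.index(j) for j in range(n)]
--             orderings.append((new_order, shuffled_order))
--     return orderings
-- ===== SOURCE B (Python) =====
-- def generate_swap_orderings(data):
--     # Transposition (0 i) is its own inverse, so each pair is the swap list twice;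
--     # the swapped list is built by a closed-form per-element formula (no mutation, no .index scan).
--     n = len(data)
--     orderings = []
--     for i in range(n):
--         order = [i if j == 0 else (0 if j == i else j) for j in range(n)]
--         orderings.append((order, list(order)))
--     return orderings
-- ===== Notes on version B (the rewrite author's own statement) =====
-- stated objective: faster
-- what changed: B builds each swapped ordering with a closed-form per-element formula and pairs it with a copy of itself (a transposition is its own inverse), eliminating A's in-place swap, the i==0 special case and the O(n) .index scan inside the inverse-building comprehension.
import Mathlib
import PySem

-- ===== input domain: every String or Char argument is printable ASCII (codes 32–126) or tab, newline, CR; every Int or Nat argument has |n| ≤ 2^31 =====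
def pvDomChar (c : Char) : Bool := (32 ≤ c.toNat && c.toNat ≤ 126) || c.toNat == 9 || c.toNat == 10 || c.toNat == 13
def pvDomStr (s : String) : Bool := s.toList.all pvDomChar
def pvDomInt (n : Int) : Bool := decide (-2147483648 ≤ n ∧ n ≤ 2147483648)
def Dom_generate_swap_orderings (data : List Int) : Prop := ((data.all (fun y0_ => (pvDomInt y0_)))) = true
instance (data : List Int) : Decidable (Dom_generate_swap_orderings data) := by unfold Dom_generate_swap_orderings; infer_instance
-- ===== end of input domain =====

-- B replaces A's in-place swap plus the O(n) `.index` scan per element by a closed-form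
-- per-element formula, pairing the swapped list with a copy of itself (a transposition is
-- its own inverse); objective: faster (no inner .index scans).

-- ===== PORT A =====
-- every index / .index call hits a value that is present, so pyGetD / pySetD / (index? …).getD 0 are exact here
def generate_swap_orderings (data : List Int) : List (List Int × List Int) :=
  let n : Int := (data.length : Int)
  (PySem.List.pyRange 0 n 1).foldl (fun orderings i =>
    if i == 0 then
      orderings ++ [(PySem.List.pyRange 0 n 1, PySem.List.pyRange 0 n 1)]
    else
      let new_order := PySem.List.pyRange 0 n 1
      let t0 := PySem.List.pyGetD new_order 0 0
      let ti := PySem.List.pyGetD new_order i 0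
      let new_order := PySem.List.pySetD new_order 0 ti
      let new_order := PySem.List.pySetD new_order i t0
      let shuffled := (PySem.List.pyRange 0 n 1).map
        (fun j => (((PySem.List.index? new_order j).getD 0 : Nat) : Int))
      orderings ++ [(new_order, shuffled)]) []

-- ===== PORT B =====
def generate_swap_orderings_alt (data : List Int) : List (List Int × List Int) :=
  let n : Int := (data.length : Int)
  (PySem.List.pyRange 0 n 1).foldl (fun orderings i =>
    let order := (PySem.List.pyRange 0 n 1).map
      (fun j => if j == 0 then i else if j == i then (0 : Int) else j)
    orderings ++ [(order, order)]) []

-- ===== PRECONDITION & SPEC =====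
def Spec_generate_swap_orderings (data : List Int) (out : List (List Int × List Int)) : Prop := out = generate_swap_orderings_alt data
instance (data : List Int) (out : List (List Int × List Int)) : Decidable (Spec_generate_swap_orderings data out) := by unfold Spec_generate_swap_orderings; infer_instance

-- ===== CLAIM (what is proved, stated in full; the proofs are below) =====
def Claim_equal_generate_swap_orderings : Prop := ∀ (data : List Int), Dom_generate_swap_orderings data → Spec_generate_swap_orderings data (generate_swap_orderings data)

-- ===== LEMMAS AND PROOFS =====
def swapList (len k : Nat) : List Int :=
  (List.range len).map (fun m => if m = 0 then (k : Int) else if m = k then 0 else (m : Int))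

theorem length_swapList (len k : Nat) : (swapList len k).length = len := by simp [swapList]

theorem getElem_swapList (len k m : Nat) (hm : m < len) :
    (swapList len k)[m]'(by simp [length_swapList, hm]) =
      (if m = 0 then (k : Int) else if m = k then 0 else (m : Int)) := by
  simp [swapList]

theorem setset_eq_swapList (len k : Nat) (hk0 : 0 < k) (hk : k < len) :
    ((List.map (fun m : Nat => (m : Int)) (List.range len)).set 0 ((k : Nat) : Int)).set k 0 = swapList len k := by
  apply List.ext_getElem
  · simp [length_swapList]
  · intro m hm hm'
    have hmlen : m < len := by simpa [length_swapList] using hm'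
    rw [getElem_swapList len k m hmlen]
    rw [List.getElem_set, List.getElem_set]
    simp only [List.getElem_map, List.getElem_range]
    split_ifs <;> first | rfl | omega

theorem idxOf?_swapList (len k m : Nat) (hk0 : 0 < k) (hk : k < len) (hm : m < len) :
    List.idxOf? ((m : Nat) : Int) (swapList len k) =
      some (if m = 0 then k else if m = k then 0 else m) := by
  rw [List.idxOf?_eq_some_iff]
  refine ⟨?_, ?_, ?_⟩
  · rw [length_swapList]; split_ifs <;> omega
  · rw [getElem_swapList len k _ (by split_ifs <;> omega)]
    split_ifs <;> simp_all <;> omega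
  · intro j hj
    have hjlen : j < len := by
      have h2 : (if m = 0 then k else if m = k then 0 else m) < len := by split_ifs <;> omega
      omega
    rw [getElem_swapList len k j hjlen]
    split_ifs at hj ⊢ <;> simp_all <;> omega

theorem ordB_eq_swapList (len k : Nat) :
    ((PySem.List.pyRange 0 (len : Int) 1).map
      (fun j => if j = (0 : Int) then ((k : Nat) : Int) else if j = ((k : Nat) : Int) then (0 : Int) else j))
      = swapList len k := by
  rw [PySem.List.pyRange_zero_natCast, List.map_map, swapList]
  apply List.map_congr_left
  intro m _
  simp only [Function.comp_apply, Nat.cast_inj]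
  split_ifs <;> simp_all <;> omega

theorem shuffled_eq_swapList (len k : Nat) (hk0 : 0 < k) (hk : k < len) :
    ((PySem.List.pyRange 0 (len : Int) 1).map
      (fun j => (((PySem.List.index? (swapList len k) j).getD 0 : Nat) : Int)))
      = swapList len k := by
  rw [PySem.List.pyRange_zero_natCast, List.map_map]
  conv_rhs => rw [swapList]
  apply List.map_congr_left
  intro m hm
  have hmlen : m < len := List.mem_range.mp hm
  have hidx : PySem.List.index? (swapList len k) ((m : Nat) : Int)
      = some (if m = 0 then k else if m = k then 0 else m) := by
    have h1 : PySem.List.index? (swapList len k) ((m : Nat) : Int)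
        = List.idxOf? ((m : Nat) : Int) (swapList len k) := rfl
    rw [h1, idxOf?_swapList len k m hk0 hk hmlen]
  simp only [Function.comp_apply, hidx, Option.getD_some]
  split_ifs <;> simp_all

def fA (len : Nat) (i : Int) : List Int × List Int :=
  if i == 0 then
    (PySem.List.pyRange 0 (len : Int) 1, PySem.List.pyRange 0 (len : Int) 1)
  else
    let R := PySem.List.pyRange 0 (len : Int) 1
    let new_order := PySem.List.pySetD (PySem.List.pySetD R 0 (PySem.List.pyGetD R i 0)) i (PySem.List.pyGetD R 0 0)
    (new_order, R.map (fun j => (((PySem.List.index? new_order j).getD 0 : Nat) : Int)))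

def fB (len : Nat) (i : Int) : List Int × List Int :=
  let order := (PySem.List.pyRange 0 (len : Int) 1).map
    (fun j => if j == 0 then i else if j == i then (0 : Int) else j)
  (order, order)

theorem A_eq_map (data : List Int) :
    generate_swap_orderings data
      = (PySem.List.pyRange 0 (data.length : Int) 1).map (fA data.length) := by
  unfold generate_swap_orderings
  rw [PySem.List.foldl_congr_mem _ _ (fun acc i => acc ++ [fA data.length i]) []
      (by intro acc i hi
          by_cases h : i = (0 : Int) <;> simp [fA, h])]
  rw [PySem.List.foldl_append_singleton_eq_map]
  simp

theorem B_eq_map (data : List Int) :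
    generate_swap_orderings_alt data
      = (PySem.List.pyRange 0 (data.length : Int) 1).map (fB data.length) := by
  unfold generate_swap_orderings_alt
  rw [PySem.List.foldl_congr_mem _ _ (fun acc i => acc ++ [fB data.length i]) []
      (by intro acc i hi; simp [fB])]
  rw [PySem.List.foldl_append_singleton_eq_map]
  simp

theorem fA_eq_fB (len : Nat) (m : Nat) (hm : m < len) :
    fA len ((m : Nat) : Int) = fB len ((m : Nat) : Int) := by
  by_cases h0 : m = 0
  · subst h0
    simp only [fA, fB, Nat.cast_zero, beq_iff_eq]
    have hid : (PySem.List.pyRange 0 (len : Int) 1).map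
        (fun j => if j = (0:Int) then (0:Int) else if j = (0:Int) then (0:Int) else j)
        = PySem.List.pyRange 0 (len : Int) 1 := by
      conv_rhs => rw [← List.map_id (PySem.List.pyRange 0 (len : Int) 1)]
      apply List.map_congr_left
      intro j _
      by_cases h : j = (0:Int) <;> simp [h]
    simp [hid]
  · have hk0 : 0 < m := Nat.pos_of_ne_zero h0
    have hA0 : ((m : Nat) : Int) ≠ 0 := by exact_mod_cast h0
    have hget0 : PySem.List.pyGetD (PySem.List.pyRange 0 (len : Int) 1) 0 0 = 0 := by
      rw [PySem.List.pyGetD_of_nonneg _ _ (by norm_num), PySem.List.pyRange_zero_natCast,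
          show ((0:Int).toNat) = 0 from rfl,
          PySem.List.getD_map_range _ len 0 0 (by omega)]
      norm_num
    have hgetm : PySem.List.pyGetD (PySem.List.pyRange 0 (len : Int) 1) ((m:Nat):Int) 0 = ((m:Nat):Int) := by
      rw [PySem.List.pyRange_zero_natCast, PySem.List.pyGetD_natCast,
          PySem.List.getD_map_range _ len m 0 hm]
    have hset : PySem.List.pySetD (PySem.List.pySetD (PySem.List.pyRange 0 (len : Int) 1) 0 ((m:Nat):Int)) ((m:Nat):Int) 0
        = swapList len m := by
      rw [PySem.List.pySetD_natCast, PySem.List.pySetD_of_nonneg _ _ (by norm_num),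
          show ((0:Int).toNat) = 0 from rfl, PySem.List.pyRange_zero_natCast]
      exact setset_eq_swapList len m hk0 hm
    simp only [fA, fB, beq_iff_eq, if_neg hA0, hget0, hgetm, hset]
    rw [shuffled_eq_swapList len m hk0 hm, ordB_eq_swapList len m]

-- ===== VERDICT (by name: the statement is the Claim_ definition above) =====
theorem generate_swap_orderings_spec : Claim_equal_generate_swap_orderings := by
  intro data _
  unfold Spec_generate_swap_orderings
  rw [A_eq_map, B_eq_map]
  apply List.map_congr_left
  intro i hi
  rw [PySem.List.pyRange_zero_natCast] at hi
  obtain ⟨m, hm, rfl⟩ := List.mem_map.mp hi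
  exact fA_eq_fB data.length m (List.mem_range.mp hm)
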